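-- pv_equiv track=rewrite | github.com/chtaube/apwgen | apwgen/apwgen.py | get_possible_digit_positions
-- ===== SOURCE A (Python) =====
-- def get_possible_digit_positions(wordlist, delimiter_len=1):
--     if len(wordlist) <= 0:
--         raise ValueError('Number of words must not be zero.')
--     result = []
--     total_length = 0
--     for i in range(0, len(wordlist)):
--         if i > 0:
--             result.append(total_length)
--         result.append(total_length + len(wordlist[i]) - 1)
--
--         total_length += len(wordlist[i])
--         if i < len(wordlist) - 1:
--             total_length += delimiter_len
--     return result
-- ===== SOURCE B (Python) =====
-- def get_possible_digit_positions(wordlist, delimiter_len=1):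
--     if not wordlist:
--         raise ValueError('Number of words must not be zero.')
--     # table of per-word start offsets (prefix sums), built separately
--     starts = [0]
--     for w in wordlist[:-1]:
--         starts.append(starts[-1] + len(w) + delimiter_len)
--     result = [starts[0] + len(wordlist[0]) - 1]
--     for s, w in zip(starts[1:], wordlist[1:]):
--         result.append(s)
--         result.append(s + len(w) - 1)
--     return result
-- ===== Notes on version B (the rewrite author's own statement) =====
-- stated objective: alternative
-- what changed: B first builds a prefix-sum table of per-word start offsets in its own pass, then emits the positions in a second pass zipping that table with the words, instead of A's single indexed loop threading one running total and interleaving emission with accumulation.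
import Mathlib
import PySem

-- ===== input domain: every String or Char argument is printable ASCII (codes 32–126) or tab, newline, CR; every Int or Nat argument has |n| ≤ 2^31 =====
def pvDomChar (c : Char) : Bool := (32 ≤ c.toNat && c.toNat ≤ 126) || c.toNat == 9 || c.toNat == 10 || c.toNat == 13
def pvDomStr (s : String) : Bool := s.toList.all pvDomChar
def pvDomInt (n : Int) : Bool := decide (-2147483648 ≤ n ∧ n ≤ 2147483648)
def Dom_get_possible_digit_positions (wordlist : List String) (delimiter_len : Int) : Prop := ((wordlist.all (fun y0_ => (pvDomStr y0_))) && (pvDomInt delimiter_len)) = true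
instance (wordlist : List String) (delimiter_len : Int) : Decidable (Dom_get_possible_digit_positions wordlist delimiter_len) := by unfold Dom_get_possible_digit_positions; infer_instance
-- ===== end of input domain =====

-- B separates the computation into a precomputed table of word start offsets followed by a
-- pass that emits positions by reading that table (zip), instead of A's single loop threading
-- one running total; same return value on every nonempty wordlist (objective: alternative).

-- ===== PORT A =====
def get_possible_digit_positions (wordlist : List String) (delimiter_len : Int) : List Int :=
  if PySem.List.len wordlist ≤ 0 then []   -- Python raises ValueError here; excluded by Pre_
  else
    ((PySem.List.pyRange 0 (PySem.List.len wordlist) 1).foldl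
      (fun (st : List Int × Int) (i : Int) =>
        let res := if i > 0 then st.1 ++ [st.2] else st.1
        -- wordlist[i]: i is always in range inside this loop, so getD is exact
        let w := (PySem.List.pyGet? wordlist i).getD ""
        let res := res ++ [st.2 + PySem.Str.len w - 1]
        let t := st.2 + PySem.Str.len w
        let t := if i < PySem.List.len wordlist - 1 then t + delimiter_len else t
        (res, t)) ([], 0)).1

-- ===== PORT B =====
def get_possible_digit_positions_alt (wordlist : List String) (delimiter_len : Int) : List Int :=
  if wordlist = [] then []   -- Python raises ValueError here; excluded by Pre_
  else
    -- starts = [0]; for w in wordlist[:-1]: starts.append(starts[-1] + len(w) + delimiter_len)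
    let starts := (PySem.List.slice wordlist none (some (-1))).foldl
      (fun (st : List Int) (w : String) =>
        st ++ [(PySem.List.pyGet? st (-1)).getD 0 + PySem.Str.len w + delimiter_len]) [0]
    -- result = [starts[0] + len(wordlist[0]) - 1]  (both indices in range: list nonempty)
    let first := (PySem.List.pyGet? starts 0).getD 0 +
                 PySem.Str.len ((PySem.List.pyGet? wordlist 0).getD "") - 1
    -- for s, w in zip(starts[1:], wordlist[1:]): result += [s, s + len(w) - 1]
    ((PySem.List.slice starts (some 1) none).zip (PySem.List.slice wordlist (some 1) none)).foldl
      (fun (res : List Int) (sw : Int × String) =>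
        res ++ [sw.1, sw.1 + PySem.Str.len sw.2 - 1]) [first]

-- ===== PRECONDITION & SPEC =====
-- Pre_ excludes only the empty wordlist, on which the Python A (and B) raise ValueError.
def Pre_get_possible_digit_positions (wordlist : List String) (delimiter_len : Int) : Prop :=
  wordlist ≠ []
instance (wordlist : List String) (delimiter_len : Int) : Decidable (Pre_get_possible_digit_positions wordlist delimiter_len) := by unfold Pre_get_possible_digit_positions; infer_instance

def pvWitness_get_possible_digit_positions : List String × Int := (["correct", "horse", "battery"], 1)

def Spec_get_possible_digit_positions (wordlist : List String) (delimiter_len : Int) (out : List Int) : Prop := out = get_possible_digit_positions_alt wordlist delimiter_len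
instance (wordlist : List String) (delimiter_len : Int) (out : List Int) : Decidable (Spec_get_possible_digit_positions wordlist delimiter_len out) := by unfold Spec_get_possible_digit_positions; infer_instance

-- ===== CLAIM (what is proved, stated in full; the proofs are below) =====
def Claim_equal_get_possible_digit_positions : Prop := ∀ (wordlist : List String) (delimiter_len : Int), Dom_get_possible_digit_positions wordlist delimiter_len → Pre_get_possible_digit_positions wordlist delimiter_len → Spec_get_possible_digit_positions wordlist delimiter_len (get_possible_digit_positions wordlist delimiter_len)

-- ===== LEMMAS AND PROOFS =====

-- canonical value: positions emitted for each word given its start offset t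
def pvEmit (d : Int) : Int → List String → List Int
  | _, [] => []
  | t, w :: rest => t :: (t + PySem.Str.len w - 1) :: pvEmit d (t + PySem.Str.len w + d) rest

-- start offsets of the words after one whose start is t
def pvTailStarts (d : Int) : Int → List String → List Int
  | _, [] => []
  | t, w :: rest => (t + PySem.Str.len w + d) :: pvTailStarts d (t + PySem.Str.len w + d) rest

theorem pvLoopA (ws : List String) (d : Int) :
    ∀ k : Nat, 1 ≤ k → ∀ (res : List Int) (t : Int),
    ((PySem.List.pyRange (k : Int) (PySem.List.len ws) 1).foldl
      (fun (st : List Int × Int) (i : Int) =>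
        let r := if i > 0 then st.1 ++ [st.2] else st.1
        let w := (PySem.List.pyGet? ws i).getD ""
        let r := r ++ [st.2 + PySem.Str.len w - 1]
        let t' := st.2 + PySem.Str.len w
        let t' := if i < PySem.List.len ws - 1 then t' + d else t'
        (r, t')) (res, t)).1 = res ++ pvEmit d t (ws.drop k) := by
  intro k
  induction hn : ws.length - k generalizing k with
  | zero =>
    intro _ res t
    have hk : ws.length ≤ k := by omega
    rw [PySem.List.pyRange_one_eq_nil (by simp [PySem.List.len_eq]; exact_mod_cast hk)]
    simp [List.drop_eq_nil_of_le hk, pvEmit]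
  | succ m ih =>
    intro hk1 res t
    have hk : k < ws.length := by omega
    rw [PySem.List.pyRange_one_cons (by simp [PySem.List.len_eq]; exact_mod_cast hk)]
    simp only [List.foldl_cons]
    have hget : (PySem.List.pyGet? ws (k : Int)).getD "" = ws[k] := by
      simp [PySem.List.pyGet?_natCast, List.getElem?_eq_getElem hk]
    have hdrop : ws.drop k = ws[k] :: ws.drop (k + 1) := List.drop_eq_getElem_cons hk
    have hpos : ((k : Int) > 0) = True := by simp; exact_mod_cast hk1
    rw [show ((k : Int) + 1) = ((k + 1 : Nat) : Int) by push_cast; ring]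
    rw [ih (k + 1) (by omega) (by omega)]
    simp only [hget, hpos, if_true]
    rw [hdrop]
    by_cases hlast : (k : Int) < PySem.List.len ws - 1
    · simp only [hlast, if_true, pvEmit]
      simp
    · have : k + 1 ≥ ws.length := by
        simp [PySem.List.len_eq] at hlast; omega
      rw [List.drop_eq_nil_of_le this]
      simp only [pvEmit]
      simp

theorem pvStartsFold (ws' : List String) (d : Int) :
    ∀ (pre : List Int) (h : pre ≠ []),
    ws'.foldl (fun (st : List Int) (w : String) =>
        st ++ [(PySem.List.pyGet? st (-1)).getD 0 + PySem.Str.len w + d]) pre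
      = pre ++ pvTailStarts d (pre.getLast h) ws' := by
  induction ws' with
  | nil => intro pre h; simp [pvTailStarts]
  | cons w rest ih =>
    intro pre h
    simp only [List.foldl_cons]
    rw [PySem.List.pyGet?_neg_one]
    have hlast : pre.getLast?.getD 0 = pre.getLast h := by
      rw [List.getLast?_eq_some_getLast h]; rfl
    rw [hlast, ih (pre ++ [pre.getLast h + PySem.Str.len w + d]) (by simp)]
    rw [List.getLast_append_singleton]
    simp [pvTailStarts]

theorem pvZipEmit (d : Int) :
    ∀ (rest : List String) (prev : String) (t : Int) (res : List Int),
    (((pvTailStarts d t ((prev :: rest).dropLast)).zip rest).foldl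
      (fun (r : List Int) (sw : Int × String) =>
        r ++ [sw.1, sw.1 + PySem.Str.len sw.2 - 1]) res)
      = res ++ pvEmit d (t + PySem.Str.len prev + d) rest := by
  intro rest
  induction rest with
  | nil => intro prev t res; simp [pvTailStarts, pvEmit]
  | cons w rr ih =>
    intro prev t res
    have : (prev :: w :: rr).dropLast = prev :: (w :: rr).dropLast := by
      simp [List.dropLast_cons₂]
    rw [this]
    simp only [pvTailStarts, List.zip_cons_cons, List.foldl_cons]
    rw [ih w (t + PySem.Str.len prev + d)]
    simp [pvEmit]

-- ===== VERDICT (by name: the statement is the Claim_ definition above) =====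
theorem get_possible_digit_positions_spec : Claim_equal_get_possible_digit_positions := by
  intro wordlist d _ hpre
  unfold Pre_get_possible_digit_positions at hpre
  unfold Spec_get_possible_digit_positions
  obtain ⟨w0, rest⟩ := List.exists_cons_of_ne_nil hpre
  obtain ⟨rest, rfl⟩ := rest
  unfold get_possible_digit_positions get_possible_digit_positions_alt
  have hlen : PySem.List.len (w0 :: rest) = (rest.length : Int) + 1 := by
    simp [PySem.List.len_eq]
  rw [if_neg (by rw [hlen]; omega), if_neg (by simp)]
  -- A side: peel off the i = 0 iteration, then pvLoopA from k = 1
  rw [PySem.List.pyRange_one_cons (by rw [hlen]; omega)]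
  simp only [List.foldl_cons]
  rw [show ((0 : Int) + 1) = ((1 : Nat) : Int) by norm_num]
  rw [pvLoopA (w0 :: rest) d 1 (by omega)]
  simp only [gt_iff_lt, lt_irrefl, if_false, List.nil_append, List.drop_succ_cons,
    List.drop_zero, PySem.List.pyGet?_zero_cons, Option.getD_some]
  -- B side: starts table, then the zip pass
  rw [PySem.List.slice_to_neg_one, PySem.List.slice_from_one, PySem.List.slice_from_one]
  rw [pvStartsFold ((w0 :: rest).dropLast) d [0] (by simp)]
  simp only [List.getLast_singleton, List.singleton_append, List.tail_cons,
    PySem.List.pyGet?_zero_cons, Option.getD_some]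
  rw [pvZipEmit d rest w0 0]
  -- both sides are now [len w0 - 1] ++ pvEmit d (len w0 + d) rest (modulo the unused last +d)
  by_cases hrest : rest = []
  · subst hrest; simp [pvEmit]
  · have : ((0 : Int) < PySem.List.len (w0 :: rest) - 1) := by
      rw [hlen]
      have : 0 < rest.length := List.length_pos_of_ne_nil hrest
      omega
    simp only [this, if_true]
    simp [zero_add]
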